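-- pv_equiv track=rewrite | github.com/wendeehsu/UniProject | ShortestPath.py | ClearPointsInRange
-- ===== SOURCE A (Python) =====
-- def distance(p1,p2):
-- 	return (p1[0]-p2[0])*(p1[0]-p2[0]) + (p1[1]-p2[1])*(p1[1]-p2[1])
--
-- def ClearPointsInRange(pos, r, matrix):
-- 	matrix[pos[0]][pos[1]] = 0
-- 	for i in range(pos[0]-r, pos[0]+r+1):
-- 		if i >= 0 and i < MaxSize:
-- 			for j in range(pos[1]-r, pos[1]+r+1):
-- 				if j >= 0 and j < MaxSize:
-- 					if matrix[i][j] == 1 and distance([i,j],pos) <= r*r:  # get points in radius = r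
-- 						matrix[i][j] = 0
-- 	return matrix
--
-- MaxSize = 500
-- ===== SOURCE B (Python) =====
-- MaxSize = 500
--
-- def ClearPointsInRange(pos, r, matrix):
-- 	matrix[pos[0]][pos[1]] = 0
-- 	for i in range(max(0, pos[0] - r), min(pos[0] + r, MaxSize - 1) + 1):
-- 		rem = r * r - (i - pos[0]) * (i - pos[0])
-- 		if rem >= 0:
-- 			dx = 0
-- 			while (dx + 1) * (dx + 1) <= rem:
-- 				dx += 1
-- 			for j in range(max(0, pos[1] - dx), min(pos[1] + dx, MaxSize - 1) + 1):
-- 				if matrix[i][j] == 1: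
-- 					matrix[i][j] = 0
-- 	return matrix
-- ===== Notes on version B (the rewrite author's own statement) =====
-- stated objective: faster
-- what changed: A tests the squared distance of every cell of the full (2r+1)x(2r+1) index square; B clips the row range to [0,500) up front and, per row, derives the exact column span from an integer square root, so it only visits the cells it clears.
import Mathlib
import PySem

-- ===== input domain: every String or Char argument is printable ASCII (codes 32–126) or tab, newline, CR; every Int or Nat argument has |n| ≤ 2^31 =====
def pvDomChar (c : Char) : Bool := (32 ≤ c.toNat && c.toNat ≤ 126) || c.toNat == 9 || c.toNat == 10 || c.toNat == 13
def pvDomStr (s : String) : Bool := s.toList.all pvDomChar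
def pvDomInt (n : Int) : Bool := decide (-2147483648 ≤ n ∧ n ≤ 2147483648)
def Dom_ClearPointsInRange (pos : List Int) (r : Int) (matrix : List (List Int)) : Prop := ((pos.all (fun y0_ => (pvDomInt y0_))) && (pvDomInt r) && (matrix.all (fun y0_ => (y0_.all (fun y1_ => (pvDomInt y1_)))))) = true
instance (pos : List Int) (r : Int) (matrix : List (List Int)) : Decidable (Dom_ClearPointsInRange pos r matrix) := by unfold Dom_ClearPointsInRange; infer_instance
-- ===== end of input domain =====

-- B replaces A's per-cell distance test over the full (2r+1)×(2r+1) index square by clipped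
-- per-row spans whose half-width is found by an integer-sqrt search.  Both Pythons mutate
-- `matrix` in place in the same way; the equivalence proved here is about the returned value.

-- ===== PORT A =====
def MaxSizePort : Int := 500

def distancePort (p1 p2 : List Int) : Int :=
  (PySem.List.pyGetD p1 0 0 - PySem.List.pyGetD p2 0 0) * (PySem.List.pyGetD p1 0 0 - PySem.List.pyGetD p2 0 0)
  + (PySem.List.pyGetD p1 1 0 - PySem.List.pyGetD p2 1 0) * (PySem.List.pyGetD p1 1 0 - PySem.List.pyGetD p2 1 0)

def ClearPointsInRange (pos : List Int) (r : Int) (matrix : List (List Int)) : List (List Int) :=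
  let p0 := PySem.List.pyGetD pos 0 0
  let p1 := PySem.List.pyGetD pos 1 0
  let m0 := PySem.List.pySetD matrix p0 (PySem.List.pySetD (PySem.List.pyGetD matrix p0 []) p1 0)
  (PySem.List.pyRange (p0 - r) (p0 + r + 1) 1).foldl (fun m i =>
    if 0 ≤ i ∧ i < MaxSizePort then
      (PySem.List.pyRange (p1 - r) (p1 + r + 1) 1).foldl (fun m j =>
        if 0 ≤ j ∧ j < MaxSizePort then
          if PySem.List.pyGetD (PySem.List.pyGetD m i []) j 0 = 1 ∧ distancePort [i, j] pos ≤ r * r then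
            PySem.List.pySetD m i (PySem.List.pySetD (PySem.List.pyGetD m i []) j 0)
          else m
        else m) m
    else m) m0

-- ===== PORT B =====
-- the hand-written integer-sqrt search of Source B:  dx = 0; while (dx+1)*(dx+1) <= rem: dx += 1
def growDx (rem : Int) (dx : Int) : Int :=
  if (dx + 1) * (dx + 1) ≤ rem then growDx rem (dx + 1) else dx
termination_by (rem + 1 - dx).toNat
decreasing_by
  have h1 : dx + 1 ≤ (dx + 1) * (dx + 1) := by rcases le_total (dx + 1) 0 with h | h <;> nlinarith
  omega

def ClearPointsInRange_alt (pos : List Int) (r : Int) (matrix : List (List Int)) : List (List Int) :=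
  let p0 := PySem.List.pyGetD pos 0 0
  let p1 := PySem.List.pyGetD pos 1 0
  let m0 := PySem.List.pySetD matrix p0 (PySem.List.pySetD (PySem.List.pyGetD matrix p0 []) p1 0)
  (PySem.List.pyRange (max 0 (p0 - r)) (min (p0 + r) (MaxSizePort - 1) + 1) 1).foldl (fun m i =>
    let rem := r * r - (i - p0) * (i - p0)
    if 0 ≤ rem then
      let dx := growDx rem 0
      (PySem.List.pyRange (max 0 (p1 - dx)) (min (p1 + dx) (MaxSizePort - 1) + 1) 1).foldl (fun m j =>
        if PySem.List.pyGetD (PySem.List.pyGetD m i []) j 0 = 1 then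
          PySem.List.pySetD m i (PySem.List.pySetD (PySem.List.pyGetD m i []) j 0)
        else m) m
    else m) m0

-- ===== PRECONDITION & SPEC =====
-- Pre_ is exactly where Python A returns: pos has the two indexed entries, the assignment
-- matrix[pos[0]][pos[1]] = 0 succeeds (Python indexing, so negative wraparound is admitted),
-- and every cell of the clipped index rectangle that A's loop reads exists.
def Pre_ClearPointsInRange (pos : List Int) (r : Int) (matrix : List (List Int)) : Prop :=
  2 ≤ pos.length ∧
  PySem.Raise.InRange matrix.length (PySem.List.pyGetD pos 0 0) ∧
  PySem.Raise.InRange (PySem.List.pyGetD matrix (PySem.List.pyGetD pos 0 0) []).length (PySem.List.pyGetD pos 1 0) ∧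
  ∀ i ∈ PySem.List.pyRange (max 0 (PySem.List.pyGetD pos 0 0 - r)) (min (PySem.List.pyGetD pos 0 0 + r) 499 + 1) 1,
    i < (matrix.length : Int) ∧
    ∀ j ∈ PySem.List.pyRange (max 0 (PySem.List.pyGetD pos 1 0 - r)) (min (PySem.List.pyGetD pos 1 0 + r) 499 + 1) 1,
      j < ((PySem.List.pyGetD matrix i []).length : Int)
instance (pos : List Int) (r : Int) (matrix : List (List Int)) : Decidable (Pre_ClearPointsInRange pos r matrix) := by unfold Pre_ClearPointsInRange; infer_instance

def pvWitness_ClearPointsInRange : List Int × Int × List (List Int) :=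
  ([1, 1], 1, [[1, 1, 1], [1, 1, 1], [1, 1, 1]])

def Spec_ClearPointsInRange (pos : List Int) (r : Int) (matrix : List (List Int)) (out : List (List Int)) : Prop := out = ClearPointsInRange_alt pos r matrix
instance (pos : List Int) (r : Int) (matrix : List (List Int)) (out : List (List Int)) : Decidable (Spec_ClearPointsInRange pos r matrix out) := by unfold Spec_ClearPointsInRange; infer_instance

-- ===== CLAIM (what is proved, stated in full; the proofs are below) =====
def Claim_equal_ClearPointsInRange : Prop := ∀ (pos : List Int) (r : Int) (matrix : List (List Int)), Dom_ClearPointsInRange pos r matrix → Pre_ClearPointsInRange pos r matrix → Spec_ClearPointsInRange pos r matrix (ClearPointsInRange pos r matrix)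

-- ===== LEMMAS AND PROOFS =====

-- A's `distance([i, j], pos)` is the squared Euclidean distance to (pos[0], pos[1]).
lemma distancePort_eq (i j : Int) (pos : List Int) :
    distancePort [i, j] pos =
      (i - PySem.List.pyGetD pos 0 0) * (i - PySem.List.pyGetD pos 0 0)
      + (j - PySem.List.pyGetD pos 1 0) * (j - PySem.List.pyGetD pos 1 0) := by
  simp [distancePort, PySem.List.pyGetD]

-- filtering an integer range by a closed interval is again a range
lemma filter_pyRange_interval (lo hi : Int) : ∀ (n : Nat) (a b : Int), (b - a).toNat = n →
    (PySem.List.pyRange a b 1).filter (fun x => decide (lo ≤ x ∧ x ≤ hi)) =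
      PySem.List.pyRange (max a lo) (min b (hi + 1)) 1 := by
  intro n
  induction n with
  | zero =>
    intro a b h
    rw [PySem.List.pyRange_one_eq_nil (by omega), PySem.List.pyRange_one_eq_nil (by omega)]
    rfl
  | succ n ih =>
    intro a b h
    rw [PySem.List.pyRange_one_cons (by omega), List.filter_cons,
      ih (a + 1) b (by omega)]
    by_cases hc : lo ≤ a ∧ a ≤ hi
    · simp only [hc, decide_true, and_self, if_true]
      rw [show max (a + 1) lo = a + 1 by omega, show max a lo = a by omega,
        ← PySem.List.pyRange_one_cons (by omega)]
    · rw [if_neg (by simpa using hc)]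
      by_cases hl : lo ≤ a
      · rw [PySem.List.pyRange_one_eq_nil (by omega), PySem.List.pyRange_one_eq_nil (by omega)]
      · rw [show max (a + 1) lo = max a lo by omega]

lemma filter_pyRange_interval' (a b lo hi : Int) :
    (PySem.List.pyRange a b 1).filter (fun x => decide (lo ≤ x ∧ x ≤ hi)) =
      PySem.List.pyRange (max a lo) (min b (hi + 1)) 1 :=
  filter_pyRange_interval lo hi _ a b rfl

-- Source B's while-loop computes the integer square root: dx² ≤ rem < (dx+1)²
lemma growDx_spec : ∀ (rem dx : Int), 0 ≤ dx → dx * dx ≤ rem →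
    (growDx rem dx) * (growDx rem dx) ≤ rem ∧ rem < (growDx rem dx + 1) * (growDx rem dx + 1) ∧ 0 ≤ growDx rem dx := by
  intro rem dx h0 h1
  induction dx using growDx.induct rem with
  | case1 dx hg ih =>
    rw [growDx, if_pos hg]
    exact ih (by omega) hg
  | case2 dx hg =>
    rw [growDx, if_neg hg]
    omega

lemma sq_le_iff_abs_le (dx rem t : Int) (h0 : 0 ≤ dx) (h1 : dx * dx ≤ rem) (h2 : rem < (dx + 1) * (dx + 1)) :
    t * t ≤ rem ↔ (-dx ≤ t ∧ t ≤ dx) := by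
  constructor
  · intro h
    constructor <;> by_contra hc <;> push Not at hc <;> nlinarith
  · rintro ⟨ha, hb⟩; nlinarith

-- the two ports agree on every input (Pre_ is only needed for faithfulness to the Pythons)
theorem ports_eq (pos : List Int) (r : Int) (matrix : List (List Int)) :
    ClearPointsInRange pos r matrix = ClearPointsInRange_alt pos r matrix := by
  unfold ClearPointsInRange ClearPointsInRange_alt
  simp only [MaxSizePort, distancePort_eq]
  set p0 := PySem.List.pyGetD pos 0 0 with hp0
  set p1 := PySem.List.pyGetD pos 1 0 with hp1
  rw [PySem.List.foldl_ite_eq_foldl_filter]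
  rw [show (fun (i : Int) => decide (0 ≤ i ∧ i < 500)) = (fun i => decide ((0:Int) ≤ i ∧ i ≤ 499)) by
    funext i; rw [decide_eq_decide]; omega]
  rw [filter_pyRange_interval']
  rw [show PySem.List.pyRange (max (p0 - r) 0) (min (p0 + r + 1) (499 + 1)) 1
      = PySem.List.pyRange (max 0 (p0 - r)) (min (p0 + r) (500 - 1) + 1) 1 by congr 1 <;> omega]
  apply PySem.List.foldl_congr_mem'
  intro i hi m
  rw [PySem.List.mem_pyRange_one] at hi
  have hr : 0 ≤ r := by omega
  have hsplit : (fun (m : List (List Int)) (j : Int) =>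
      if 0 ≤ j ∧ j < 500 then
        if PySem.List.pyGetD (PySem.List.pyGetD m i []) j 0 = 1 ∧
            (i - p0) * (i - p0) + (j - p1) * (j - p1) ≤ r * r then
          PySem.List.pySetD m i (PySem.List.pySetD (PySem.List.pyGetD m i []) j 0)
        else m
      else m)
      = (fun m j =>
      if 0 ≤ j ∧ j < 500 ∧ (j - p1) * (j - p1) ≤ r * r - (i - p0) * (i - p0) then
        if PySem.List.pyGetD (PySem.List.pyGetD m i []) j 0 = 1 then
          PySem.List.pySetD m i (PySem.List.pySetD (PySem.List.pyGetD m i []) j 0)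
        else m
      else m) := by
    funext m j
    have hiff : ((i - p0) * (i - p0) + (j - p1) * (j - p1) ≤ r * r)
        ↔ ((j - p1) * (j - p1) ≤ r * r - (i - p0) * (i - p0)) := by constructor <;> intro <;> linarith
    split_ifs <;> tauto
  rw [hsplit, PySem.List.foldl_ite_eq_foldl_filter]
  by_cases hrem : 0 ≤ r * r - (i - p0) * (i - p0)
  · rw [if_pos hrem]
    obtain ⟨hd1, hd2, hd3⟩ := growDx_spec (r * r - (i - p0) * (i - p0)) 0 le_rfl (by simpa using hrem)
    set dx := growDx (r * r - (i - p0) * (i - p0)) 0 with hdx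
    have hdxr : dx ≤ r := by
      by_contra hgt
      push Not at hgt
      have : r * r < dx * dx := mul_self_lt_mul_self hr hgt
      nlinarith [mul_self_nonneg (i - p0)]
    rw [show (fun (j : Int) => decide (0 ≤ j ∧ j < 500 ∧ (j - p1) * (j - p1) ≤ r * r - (i - p0) * (i - p0)))
        = (fun j => decide (max 0 (p1 - dx) ≤ j ∧ j ≤ min 499 (p1 + dx))) by
      funext j
      rw [decide_eq_decide, sq_le_iff_abs_le dx _ (j - p1) hd3 hd1 hd2]
      omega]
    rw [filter_pyRange_interval']
    rw [show PySem.List.pyRange (max (p1 - r) (max 0 (p1 - dx))) (min (p1 + r + 1) (min 499 (p1 + dx) + 1)) 1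
        = PySem.List.pyRange (max 0 (p1 - dx)) (min (p1 + dx) (500 - 1) + 1) 1 by congr 1 <;> omega]
  · rw [if_neg hrem]
    rw [show (PySem.List.pyRange (p1 - r) (p1 + r + 1) 1).filter
        (fun j => decide (0 ≤ j ∧ j < 500 ∧ (j - p1) * (j - p1) ≤ r * r - (i - p0) * (i - p0))) = [] from
      List.filter_eq_nil_iff.mpr (by
        intro j hj
        simp only [decide_eq_true_eq, not_and]
        intro _ _
        nlinarith [mul_self_nonneg (j - p1)])]
    rfl

-- ===== VERDICT (by name: the statement is the Claim_ definition above) =====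
theorem ClearPointsInRange_spec : Claim_equal_ClearPointsInRange := by
  intro pos r matrix _hdom _hpre
  exact ports_eq pos r matrix
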